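-- pv_equiv track=rewrite | github.com/xznhj8129/crsf-experiments-lain | crsfrecorder/crsf_tele_reader.py | group_by_category
-- ===== SOURCE A (Python) =====
-- CATEGORY_ORDER = ["ATTITUDE", "GPS", "BATTERY", "VARIO", "LINK"]
--
-- def group_by_category(per_flag, selected_flags):
--     """
--     Return list of (category, [flags in order]) filtered to those with data.
--     Category order follows CATEGORY_ORDER, with any extras appended.
--     """
--     cats = {}
--     for flag in selected_flags:
--         if flag in per_flag:
--             cat = per_flag[flag]["cat"]
--             cats.setdefault(cat, []).append(flag)
--
--     ordered_cats = []
--     seen = set()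
--     for c in CATEGORY_ORDER:
--         if c in cats:
--             ordered_cats.append((c, cats[c]))
--             seen.add(c)
--     # Append any categories not in CATEGORY_ORDER
--     for c, flags in cats.items():
--         if c not in seen:
--             ordered_cats.append((c, flags))
--     return ordered_cats
-- ===== SOURCE B (Python) =====
-- CATEGORY_ORDER = ["ATTITUDE", "GPS", "BATTERY", "VARIO", "LINK"]
--
-- def group_by_category(per_flag, selected_flags):
--     hits = [f for f in selected_flags if f in per_flag]
--     cats_seq = [per_flag[f]["cat"] for f in hits]
--     order = [c for c in CATEGORY_ORDER if c in cats_seq] + \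
--             [c for c in dict.fromkeys(cats_seq) if c not in CATEGORY_ORDER]
--     return [(c, [f for cf, f in zip(cats_seq, hits) if cf == c]) for c in order]
-- ===== Notes on version B (the rewrite author's own statement) =====
-- stated objective: alternative
-- what changed: B drops A's dict-of-lists accumulator (setdefault/append) and its two ordering loops with a 'seen' set: it derives the category sequence of the selected hits, computes the output order as a filter of CATEGORY_ORDER plus deduplicated extras, and rebuilds each category's flag list by filtering the zipped (category, flag) pairs.
import Mathlib
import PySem

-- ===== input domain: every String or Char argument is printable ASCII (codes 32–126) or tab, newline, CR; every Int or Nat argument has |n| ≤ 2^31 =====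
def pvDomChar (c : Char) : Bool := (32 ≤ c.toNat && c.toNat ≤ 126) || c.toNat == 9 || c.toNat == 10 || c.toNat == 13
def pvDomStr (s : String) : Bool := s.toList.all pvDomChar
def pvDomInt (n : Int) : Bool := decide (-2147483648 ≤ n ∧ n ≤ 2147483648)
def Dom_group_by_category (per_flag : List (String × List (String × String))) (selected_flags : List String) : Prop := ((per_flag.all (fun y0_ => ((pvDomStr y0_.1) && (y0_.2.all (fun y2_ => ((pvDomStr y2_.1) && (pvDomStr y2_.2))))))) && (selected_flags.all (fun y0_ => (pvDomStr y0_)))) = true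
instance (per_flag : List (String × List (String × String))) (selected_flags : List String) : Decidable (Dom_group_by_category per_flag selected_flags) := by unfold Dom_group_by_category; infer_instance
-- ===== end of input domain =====

-- B replaces A's dict-of-lists accumulator and its two ordering loops with a 'seen' set by a
-- declarative pipeline: the category sequence of the hits, an order list (filtered CATEGORY_ORDER
-- plus deduplicated extras), and per-category flag lists rebuilt by filtering zipped pairs
-- (objective: alternative decomposition; not claimed faster).

def CATEGORY_ORDER : List String := ["ATTITUDE", "GPS", "BATTERY", "VARIO", "LINK"]

-- ===== PORT A =====
def group_by_category (per_flag : List (String × List (String × String))) (selected_flags : List String) : List (String × List String) :=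
  -- first loop: cats.setdefault(per_flag[flag]["cat"], []).append(flag); 'flag in per_flag'
  -- and the subsequent per_flag[flag] lookup are the single match on get? (contains = get?.isSome)
  let cats : PySem.Dict String (List String) := selected_flags.foldl (fun cats flag =>
    match (PySem.Dict.ofList per_flag).get? flag with
    | some inner =>
      match (PySem.Dict.ofList inner).get? "cat" with
      | some cat => cats.modify cat [] (fun l => l ++ [flag])
      | none => cats        -- Python raises KeyError here; excluded by Pre_
    | none => cats) PySem.Dict.empty
  -- second loop: ordered_cats / seen over CATEGORY_ORDER ('if c in cats' = match on get?)
  let p2 : List (String × List String) × PySem.Set String := CATEGORY_ORDER.foldl (fun st c =>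
    match cats.get? c with
    | some v => (st.1 ++ [(c, v)], PySem.Set.add st.2 c)
    | none => st) ([], PySem.Set.empty)
  -- third loop: append items whose category is not in seen
  cats.items.foldl (fun acc kv => if PySem.Set.contains p2.2 kv.1 then acc else acc ++ [kv]) p2.1

-- ===== PORT B =====
def group_by_category_alt (per_flag : List (String × List (String × String))) (selected_flags : List String) : List (String × List String) :=
  let pf := PySem.Dict.ofList per_flag
  -- hits = [f for f in selected_flags if f in per_flag]
  let hits := selected_flags.filter (fun f => pf.contains f)
  -- cats_seq = [per_flag[f]["cat"] for f in hits]   (getD: "cat" is present for hits under Pre_;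
  -- Python raises KeyError where it is absent, excluded by Pre_)
  let cats_seq := hits.map (fun f => (PySem.Dict.ofList (pf.getD f [])).getD "cat" "")
  -- order = known categories that occur, then first occurrences of the extra categories
  let order := CATEGORY_ORDER.filter (fun c => cats_seq.contains c) ++
               (PySem.List.dedup cats_seq).filter (fun c => !CATEGORY_ORDER.contains c)
  -- [(c, [f for cf, f in zip(cats_seq, hits) if cf == c]) for c in order]
  order.map (fun c => (c, ((cats_seq.zip hits).filter (fun p => p.1 == c)).map (fun p => p.2)))

-- ===== PRECONDITION & SPEC =====
-- Pre_ excludes exactly the inputs where Python A raises KeyError: a selected flag present in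
-- per_flag whose entry dict lacks the key "cat".
def Pre_group_by_category (per_flag : List (String × List (String × String))) (selected_flags : List String) : Prop :=
  (selected_flags.all (fun flag =>
    match (PySem.Dict.ofList per_flag).get? flag with
    | some inner => (PySem.Dict.ofList inner).contains "cat"
    | none => true)) = true
instance (per_flag : List (String × List (String × String))) (selected_flags : List String) : Decidable (Pre_group_by_category per_flag selected_flags) := by unfold Pre_group_by_category; infer_instance
def pvWitness_group_by_category : (List (String × List (String × String))) × List String :=
  ([("alt", [("cat", "VARIO")]), ("sats", [("cat", "GPS")])], ["sats", "alt", "x"])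

def Spec_group_by_category (per_flag : List (String × List (String × String))) (selected_flags : List String) (out : List (String × List String)) : Prop := out = group_by_category_alt per_flag selected_flags
instance (per_flag : List (String × List (String × String))) (selected_flags : List String) (out : List (String × List String)) : Decidable (Spec_group_by_category per_flag selected_flags out) := by unfold Spec_group_by_category; infer_instance

-- ===== CLAIM (what is proved, stated in full; the proofs are below) =====
def Claim_equal_group_by_category : Prop := ∀ (per_flag : List (String × List (String × String))) (selected_flags : List String), Dom_group_by_category per_flag selected_flags → Pre_group_by_category per_flag selected_flags → Spec_group_by_category per_flag selected_flags (group_by_category per_flag selected_flags)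

-- ===== LEMMAS AND PROOFS =====

-- B's intermediate values, named for the proofs
def pvCat (pf : PySem.Dict String (List (String × String))) (f : String) : String :=
  (PySem.Dict.ofList (pf.getD f [])).getD "cat" ""
def pvHits (pf : PySem.Dict String (List (String × String))) (sel : List String) : List String :=
  sel.filter (fun f => pf.contains f)
def pvPairs (pf : PySem.Dict String (List (String × String))) (sel : List String) : List (String × String) :=
  ((pvHits pf sel).map (pvCat pf)).zip (pvHits pf sel)

-- Under Pre_, A's first loop is the grouping fold over B's (category, flag) pairs
lemma pvFoldA (pf : PySem.Dict String (List (String × String))) :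
    ∀ (sel : List String) (d : PySem.Dict String (List String)),
    (sel.all (fun flag =>
      match pf.get? flag with
      | some inner => (PySem.Dict.ofList inner).contains "cat"
      | none => true)) = true →
    sel.foldl (fun cats flag =>
      match pf.get? flag with
      | some inner =>
        match (PySem.Dict.ofList inner).get? "cat" with
        | some cat => cats.modify cat [] (fun l => l ++ [flag])
        | none => cats
      | none => cats) d
      = (pvPairs pf sel).foldl (fun d p => d.modify p.1 [] (fun l => l ++ [p.2])) d := by
  intro sel
  induction sel with
  | nil => intro d _; rfl
  | cons f t ih =>
    intro d hpre
    rw [List.all_cons, Bool.and_eq_true] at hpre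
    obtain ⟨hf, ht⟩ := hpre
    simp only [List.foldl_cons]
    cases hgf : pf.get? f with
    | none =>
      have hcf : pf.contains f = false := by
        rw [PySem.Dict.contains_eq_isSome_get?, hgf]; rfl
      have hh : pvHits pf (f :: t) = pvHits pf t := by
        simp [pvHits, hcf]
      rw [ih d ht]
      simp only [pvPairs, hh]
    | some inner =>
      have hcf : pf.contains f = true := by
        rw [PySem.Dict.contains_eq_isSome_get?, hgf]; rfl
      have hf' : (PySem.Dict.ofList inner).contains "cat" = true := by
        simpa [hgf] using hf
      have hcat : (PySem.Dict.ofList inner).get? "cat" = some (pvCat pf f) := by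
        rw [PySem.Dict.contains_eq_isSome_get?] at hf'
        cases hc : (PySem.Dict.ofList inner).get? "cat" with
        | none => rw [hc] at hf'; simp at hf'
        | some v =>
          have : pvCat pf f = v := by
            unfold pvCat
            rw [PySem.Dict.getD_of_get?_eq_some _ _ hgf, PySem.Dict.getD_eq_get?_getD, hc]
            rfl
          rw [this]
      have hh : pvHits pf (f :: t) = f :: pvHits pf t := by
        simp [pvHits, hcf]
      simp only [hcat]
      rw [ih _ ht]
      simp only [pvPairs, hh, List.map_cons, List.zip_cons_cons, List.foldl_cons]

-- the filterMap over a lookup characterised by membership in cs is a filter-then-map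
lemma pvFilterMap (G : PySem.Dict String (List String)) (cs : List String)
    (grp : String → List String)
    (hG : ∀ c, G.get? c = if cs.contains c then some (grp c) else none) :
    ∀ L : List String,
      L.filterMap (fun c => (G.get? c).map (fun v => (c, v)))
        = (L.filter (fun c => cs.contains c)).map (fun c => (c, grp c)) := by
  intro L
  induction L with
  | nil => rfl
  | cons c t ih =>
    simp only [List.filterMap_cons, List.filter_cons, hG c]
    by_cases h : c ∈ cs
    · simp [h, ih]
    · simp [h, ih]

-- A's second loop: accumulated list (reused shape)
lemma pvLoop2_fst (cats : PySem.Dict String (List String)) :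
    ∀ (Lc : List String) (acc : List (String × List String)) (seen : PySem.Set String),
    (Lc.foldl (fun st c =>
      match cats.get? c with
      | some v => (st.1 ++ [(c, v)], PySem.Set.add st.2 c)
      | none => st) (acc, seen)).1
      = acc ++ Lc.filterMap (fun c => (cats.get? c).map (fun v => (c, v))) := by
  intro Lc
  induction Lc with
  | nil => intro acc seen; simp
  | cons c t ih =>
    intro acc seen
    simp only [List.foldl_cons, List.filterMap_cons]
    cases hc : cats.get? c with
    | none => simp only [Option.map_none]; exact ih acc seen
    | some v =>
      simp only [Option.map_some]
      rw [ih (acc ++ [(c, v)]) (PySem.Set.add seen c)]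
      simp

-- A's second loop: membership in 'seen'
lemma pvLoop2_snd (cats : PySem.Dict String (List String)) :
    ∀ (Lc : List String) (acc : List (String × List String)) (seen : PySem.Set String) (x : String),
    (x ∈ (Lc.foldl (fun st c =>
      match cats.get? c with
      | some v => (st.1 ++ [(c, v)], PySem.Set.add st.2 c)
      | none => st) (acc, seen)).2)
      ↔ x ∈ seen ∨ (x ∈ Lc ∧ (cats.get? x).isSome) := by
  intro Lc
  induction Lc with
  | nil => intro acc seen x; simp
  | cons c t ih =>
    intro acc seen x
    simp only [List.foldl_cons]
    cases hc : cats.get? c with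
    | none =>
      rw [ih acc seen x]
      constructor
      · rintro (h | ⟨h1, h2⟩)
        · exact Or.inl h
        · exact Or.inr ⟨by simp [h1], h2⟩
      · rintro (h | ⟨h1, h2⟩)
        · exact Or.inl h
        · rcases List.mem_cons.mp h1 with rfl | h1
          · rw [hc] at h2; simp at h2
          · exact Or.inr ⟨h1, h2⟩
    | some v =>
      rw [ih (acc ++ [(c, v)]) (PySem.Set.add seen c) x]
      rw [PySem.Set.mem_add]
      constructor
      · rintro ((h | rfl) | ⟨h1, h2⟩)
        · exact Or.inl h
        · exact Or.inr ⟨by simp, by simp [hc]⟩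
        · exact Or.inr ⟨by simp [h1], h2⟩
      · rintro (h | ⟨h1, h2⟩)
        · exact Or.inl (Or.inl h)
        · rcases List.mem_cons.mp h1 with rfl | h1
          · exact Or.inl (Or.inr rfl)
          · exact Or.inr ⟨h1, h2⟩

-- A skip-loop over a Boolean test is an append-filter on the negated test
lemma pvFoldlSkip {α : Type} (p : α → Bool) (l acc : List α) :
    l.foldl (fun acc x => if p x then acc else acc ++ [x]) acc
      = acc ++ l.filter (fun x => !p x) := by
  rw [← PySem.List.foldl_append_if_eq_filter (fun x => !p x) l acc]
  congr 1
  funext acc x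
  cases hp : p x <;> simp

-- ===== VERDICT (by name: the statement is the Claim_ definition above) =====
theorem group_by_category_spec : Claim_equal_group_by_category := by
  intro per_flag sel _hDom hPre
  unfold Pre_group_by_category at hPre
  unfold Spec_group_by_category
  simp only [group_by_category, group_by_category_alt]
  rw [pvFoldA (PySem.Dict.ofList per_flag) sel PySem.Dict.empty hPre]
  set pf := PySem.Dict.ofList per_flag with hpf
  set pairs := pvPairs pf sel with hpairs
  set G := pairs.foldl (fun d p => d.modify p.1 [] (fun l => l ++ [p.2])) PySem.Dict.empty with hGdef
  set hits := pvHits pf sel with hhits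
  set cats_seq := hits.map (pvCat pf) with hcs
  have hfst : pairs.map Prod.fst = cats_seq := by
    rw [hpairs, pvPairs, hcs, hhits]
    exact List.map_fst_zip (by rw [List.length_map])
  have hkeys : G.keys = PySem.List.dedup cats_seq := by
    rw [hGdef, PySem.Dict.keys_foldl_modify_key pairs Prod.fst [] (fun _ p l => l ++ [p.2]),
        PySem.Dict.keys_empty, hfst, PySem.List.dedup_eq_ofList]
    rfl
  have hnd : G.keys.Nodup := by
    rw [hkeys, PySem.List.dedup_eq_ofList]; exact PySem.Set.nodup_ofList _
  have hgetD : ∀ c, G.getD c [] = (pairs.filter (fun p => p.1 == c)).map (fun p => p.2) := by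
    intro c
    rw [hGdef, PySem.Dict.getD_foldl_modify_append, PySem.Dict.getD_empty]
    rfl
  have hmemkeys : ∀ c, c ∈ G.keys ↔ c ∈ cats_seq := by
    intro c
    rw [hkeys, PySem.List.dedup_eq_ofList, PySem.Set.mem_ofList]
  have hG : ∀ c, G.get? c = if cats_seq.contains c then
      some ((pairs.filter (fun p => p.1 == c)).map (fun p => p.2)) else none := by
    intro c
    cases hg : G.get? c with
    | none =>
      have : c ∉ G.keys := (PySem.Dict.get?_eq_none_iff_not_mem_keys G c).mp hg
      rw [(hmemkeys c).not] at this
      rw [if_neg (by simpa using this)]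
    | some v =>
      have hmem : c ∈ G.keys := by
        rw [← PySem.Dict.contains_iff_mem_keys, PySem.Dict.contains_eq_isSome_get?, hg]; rfl
      rw [if_pos (by simpa using (hmemkeys c).mp hmem), ← hgetD c,
          PySem.Dict.getD_of_get?_eq_some _ _ hg]
  -- part 1: the CATEGORY_ORDER loop
  rw [pvLoop2_fst G CATEGORY_ORDER [] PySem.Set.empty, List.nil_append]
  rw [pvFilterMap G cats_seq (fun c => (pairs.filter (fun p => p.1 == c)).map (fun p => p.2)) hG CATEGORY_ORDER]
  -- part 2: the leftover-items loop
  rw [pvFoldlSkip (fun kv => PySem.Set.contains (CATEGORY_ORDER.foldl (fun st c =>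
        match G.get? c with
        | some v => (st.1 ++ [(c, v)], PySem.Set.add st.2 c)
        | none => st) ([], PySem.Set.empty)).2 kv.1) G.items]
  have hfilter : G.items.filter (fun kv => !PySem.Set.contains (CATEGORY_ORDER.foldl (fun st c =>
        match G.get? c with
        | some v => (st.1 ++ [(c, v)], PySem.Set.add st.2 c)
        | none => st) ([], PySem.Set.empty)).2 kv.1)
      = ((PySem.List.dedup cats_seq).filter (fun c => !CATEGORY_ORDER.contains c)).map
          (fun c => (c, (pairs.filter (fun p => p.1 == c)).map (fun p => p.2))) := by
    rw [PySem.Dict.items_eq_map_keys G hnd []]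
    rw [List.filter_map]
    have hcong : ∀ k ∈ G.keys,
        ((fun (kv : String × List String) => !PySem.Set.contains (CATEGORY_ORDER.foldl (fun st c =>
            match G.get? c with
            | some v => (st.1 ++ [(c, v)], PySem.Set.add st.2 c)
            | none => st) ([], PySem.Set.empty)).2 kv.1) ∘ (fun k => (k, G.getD k []))) k
          = !CATEGORY_ORDER.contains k := by
      intro k hk
      have hsome : (G.get? k).isSome := by
        rw [← PySem.Dict.contains_eq_isSome_get?, PySem.Dict.contains_iff_mem_keys]
        exact hk
      have hseen : (k ∈ (CATEGORY_ORDER.foldl (fun st c =>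
          match G.get? c with
          | some v => (st.1 ++ [(c, v)], PySem.Set.add st.2 c)
          | none => st) ([], PySem.Set.empty)).2) ↔ k ∈ CATEGORY_ORDER := by
        rw [pvLoop2_snd G CATEGORY_ORDER [] PySem.Set.empty k]
        simp [PySem.Set.empty, hsome]
      simp only [PySem.Set.empty] at hseen
      simp only [Function.comp, PySem.Set.contains]
      rw [Bool.eq_iff_iff]
      simp [hseen]
    rw [List.filter_congr hcong, hkeys]
    congr 1
    funext c
    rw [hgetD c]
  rw [hfilter, ← List.map_append]
  simp only [hpairs, hcs, hhits, pvPairs, pvHits]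
  rfl
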